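-- pv_equiv track=rewrite | github.com/MaherBouidani/CrackTheCoding_InPython | General Problems/sum _even_odd.py | solution
-- ===== SOURCE A (Python) =====
-- def solution(numbers):
--
--     sum_even = 0
--     sum_odd = 0
--
--
--     for index in range(len(numbers)):
--
--         if index % 2 == 0:
--             sum_even += numbers[index]
--         elif index % 2 !=0:
--             sum_odd += numbers[index]
--
--         '''
--         second approach to use sum with itterator:
--         sum_even = (numbers[i] for i in range(len(numbers)) if i % 2 == 0)
--         sum_odd = (numbers[i] for i in range(len(numbers)) if i % 2 != 0)
--         '''
--
--     if sum_even > sum_odd: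
--         return "even"
--     elif sum_odd > sum_even:
--         return "odd"
--     else:
--         return "equal"
-- ===== SOURCE B (Python) =====
-- def solution(numbers):
--     # Walk the list two elements per step via an iterator: each step adds one
--     # even-position value and (if present) the following odd-position value.
--     sum_even = 0
--     sum_odd = 0
--     it = iter(numbers)
--     for even_value in it:
--         sum_even += even_value
--         sum_odd += next(it, 0)
--     if sum_even > sum_odd:
--         return "even"
--     elif sum_odd > sum_even:
--         return "odd"
--     return "equal"
-- ===== Notes on version B (the rewrite author's own statement) =====
-- stated objective: alternative
-- what changed: Replaces the index loop with its modulo parity branch by a pairwise walk that consumes two elements per iteration from a single iterator (no indices, no parity test), adding the first of each pair to the even total and the second to the odd total.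
import Mathlib
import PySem

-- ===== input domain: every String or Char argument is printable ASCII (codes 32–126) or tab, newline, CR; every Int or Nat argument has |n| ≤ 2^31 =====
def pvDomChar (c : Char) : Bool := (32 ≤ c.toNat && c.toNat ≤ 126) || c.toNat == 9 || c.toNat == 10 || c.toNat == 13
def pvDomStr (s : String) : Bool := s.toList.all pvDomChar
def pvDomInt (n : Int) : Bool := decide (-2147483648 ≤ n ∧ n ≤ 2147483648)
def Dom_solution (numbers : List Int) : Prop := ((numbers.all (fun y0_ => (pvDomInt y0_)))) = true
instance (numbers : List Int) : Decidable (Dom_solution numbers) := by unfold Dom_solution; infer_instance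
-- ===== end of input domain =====

-- B replaces A's indexed parity-branching loop by a pairwise iterator walk that
-- consumes two elements per step (first of each pair → even total, second → odd total);
-- objective: alternative decomposition (no per-element indexing or modulo).


-- ===== PORT A =====
def solution (numbers : List Int) : String :=
  -- sum_even = 0; sum_odd = 0; for index in range(len(numbers)): parity branch
  let r := (PySem.List.pyRange 0 (PySem.List.len numbers) 1).foldl
    (fun (st : Int × Int) index =>
      if PySem.Int.mod index 2 == 0 then
        (st.1 + PySem.List.pyGetD numbers index 0, st.2)
      else if PySem.Int.mod index 2 != 0 then
        (st.1, st.2 + PySem.List.pyGetD numbers index 0)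
      else st) (0, 0)
  if r.1 > r.2 then "even" else if r.2 > r.1 then "odd" else "equal"

-- ===== PORT B =====
/-- One loop iteration of Source B consumes TWO elements from the iterator:
`sum_even += even_value; sum_odd += next(it, 0)` — transcribed as a
two-at-a-time structural recursion (a lone final element contributes `0` to the odd total,
matching `next(it, 0)`). -/
def pairSums : List Int → Int × Int
  | [] => (0, 0)
  | [a] => (a, 0)
  | a :: b :: t => let p := pairSums t; (a + p.1, b + p.2)

def solution_alt (numbers : List Int) : String :=
  let p := pairSums numbers
  if p.1 > p.2 then "even" else if p.2 > p.1 then "odd" else "equal"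

-- ===== PRECONDITION & SPEC =====
def Spec_solution (numbers : List Int) (out : String) : Prop := out = solution_alt numbers
instance (numbers : List Int) (out : String) : Decidable (Spec_solution numbers out) := by unfold Spec_solution; infer_instance

-- ===== CLAIM (what is proved, stated in full; the proofs are below) =====
def Claim_equal_solution : Prop := ∀ (numbers : List Int), Dom_solution numbers → Spec_solution numbers (solution numbers)

-- ===== LEMMAS AND PROOFS =====

/-- Peeling one element off the front swaps the two pairwise totals. -/
lemma pairSums_cons : ∀ (t : List Int) (a : Int),
    pairSums (a :: t) = (a + (pairSums t).2, (pairSums t).1) := by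
  intro t
  induction t with
  | nil => intro a; simp [pairSums]
  | cons b u ih =>
      intro a
      simp [pairSums, ih b]

/-- A's enumerate-style fold, started at index `i`, adds the pairwise totals,
swapped when `i` is odd. -/
lemma foldA_eq (xs : List Int) : ∀ (i se so : Int), 0 ≤ i →
    (PySem.List.enumerate xs i).foldl
      (fun (st : Int × Int) (p : Int × Int) =>
        if PySem.Int.mod p.1 2 == 0 then (st.1 + p.2, st.2)
        else if PySem.Int.mod p.1 2 != 0 then (st.1, st.2 + p.2)
        else st) (se, so)
      = (if i % 2 = 0 then (se + (pairSums xs).1, so + (pairSums xs).2)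
         else (se + (pairSums xs).2, so + (pairSums xs).1)) := by
  induction xs with
  | nil => intro i se so hi; simp [PySem.List.enumerate, pairSums]
  | cons a t ih =>
      intro i se so hi
      have hcons : PySem.List.enumerate (a :: t) i = (i, a) :: PySem.List.enumerate t (i + 1) := by
        simp [PySem.List.enumerate]
      have hmod : PySem.Int.mod i 2 = i % 2 := by
        simp [PySem.Int.mod, Int.fmod_eq_emod]
      rw [hcons]
      simp only [List.foldl_cons, hmod, pairSums_cons t a]
      by_cases h : i % 2 = 0
      · have h2 : ¬ (i + 1) % 2 = 0 := by omega
        rw [if_pos (by simp [h]), ih (i+1) (se + a) so (by omega)]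
        simp [h, h2]; ring
      · have h1 : i % 2 = 1 := by omega
        have h2 : (i + 1) % 2 = 0 := by omega
        rw [if_neg (by simp [h1]), if_pos (by simp [h1]), ih (i+1) se (so + a) (by omega)]
        simp [h, h2]; ring

-- ===== VERDICT (by name: the statement is the Claim_ definition above) =====
theorem solution_spec : Claim_equal_solution := by
  intro numbers _
  show solution numbers = solution_alt numbers
  have hmap := PySem.List.enumerate_eq_map_pyRange numbers (0 : Int)
  have hfold :
      (PySem.List.pyRange 0 (PySem.List.len numbers) 1).foldl
        (fun (st : Int × Int) index =>
          if PySem.Int.mod index 2 == 0 then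
            (st.1 + PySem.List.pyGetD numbers index 0, st.2)
          else if PySem.Int.mod index 2 != 0 then
            (st.1, st.2 + PySem.List.pyGetD numbers index 0)
          else st) ((0 : Int), (0 : Int))
      = (PySem.List.enumerate numbers 0).foldl
        (fun (st : Int × Int) (p : Int × Int) =>
          if PySem.Int.mod p.1 2 == 0 then (st.1 + p.2, st.2)
          else if PySem.Int.mod p.1 2 != 0 then (st.1, st.2 + p.2)
          else st) ((0 : Int), (0 : Int)) := by
    rw [hmap, List.foldl_map]
  have hA := foldA_eq numbers 0 0 0 (by omega)
  simp only [solution, solution_alt, hfold, hA]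
  norm_num
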